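-- pv_equiv track=rewrite | github.com/im-heimu/DataSaur-2026-Case-QazCode- | src/training/build_features.py | build_icd_descriptions
-- ===== SOURCE A (Python) =====
-- def build_icd_descriptions(pf_map: dict) -> dict[str, str]:
--     """Build text descriptions for each ICD code across all protocols."""
--     desc_map = {}
--     for pf in pf_map.values():
--         code_descs = pf.get("icd_code_descriptions", [])
--         for cd in code_descs:
--             code = cd.get("code", "")
--             if not code:
--                 continue
--             name = cd.get("name", "")
--             features = cd.get("distinguishing_features", "")
--             text = f"{name}. {features}"
--             if code not in desc_map or len(text) > len(desc_map[code]):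
--                 desc_map[code] = text
--     return desc_map
-- ===== SOURCE B (Python) =====
-- from collections import defaultdict
--
--
-- def build_icd_descriptions(pf_map: dict) -> dict[str, str]:
--     """Build text descriptions for each ICD code across all protocols."""
--     groups = defaultdict(list)
--     for pf in pf_map.values():
--         for cd in pf.get("icd_code_descriptions", []):
--             code = cd.get("code", "")
--             if code:
--                 groups[code].append(f"{cd.get('name', '')}. {cd.get('distinguishing_features', '')}")
--     return {code: max(texts, key=len) for code, texts in groups.items()}
-- ===== Notes on version B (the rewrite author's own statement) =====
-- stated objective: alternative
-- what changed: A keeps a running longest-text-so-far per code with an in-place compare-and-replace dict update; B first groups all texts per code into a defaultdict(list) and then builds the result in a dict comprehension taking max(texts, key=len) per code.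
import Mathlib
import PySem

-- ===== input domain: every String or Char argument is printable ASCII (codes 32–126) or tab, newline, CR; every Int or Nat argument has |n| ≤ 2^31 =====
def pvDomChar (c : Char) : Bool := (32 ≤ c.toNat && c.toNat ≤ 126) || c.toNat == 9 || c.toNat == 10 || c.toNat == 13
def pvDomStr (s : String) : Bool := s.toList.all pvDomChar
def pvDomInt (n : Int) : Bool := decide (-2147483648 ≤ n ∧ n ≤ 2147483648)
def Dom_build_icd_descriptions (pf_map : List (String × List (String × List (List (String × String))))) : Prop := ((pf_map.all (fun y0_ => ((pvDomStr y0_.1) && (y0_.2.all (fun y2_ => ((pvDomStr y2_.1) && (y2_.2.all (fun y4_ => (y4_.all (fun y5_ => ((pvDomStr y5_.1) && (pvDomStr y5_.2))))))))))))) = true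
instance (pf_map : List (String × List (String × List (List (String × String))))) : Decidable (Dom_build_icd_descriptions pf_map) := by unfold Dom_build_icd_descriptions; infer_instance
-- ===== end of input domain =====

-- B groups all texts per code first and takes the first longest per group, instead of A's
-- running compare-and-replace; alternative decomposition, same cost, return value identical.

-- shared helpers: the field reads both Pythons perform on a cd dict
def pvCode (cd : List (String × String)) : String :=
  (PySem.Dict.ofList cd).getD "code" ""
def pvText (cd : List (String × String)) : String :=
  (PySem.Dict.ofList cd).getD "name" "" ++ ". " ++ (PySem.Dict.ofList cd).getD "distinguishing_features" ""

-- ===== PORT A =====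
def build_icd_descriptions (pf_map : List (String × List (String × List (List (String × String))))) : List (String × String) :=
  ((PySem.Dict.ofList pf_map).values.foldl (fun desc_map pf =>
      ((PySem.Dict.ofList pf).getD "icd_code_descriptions" []).foldl (fun d cd =>
        if pvCode cd = "" then d
        else if d.contains (pvCode cd) = false ∨
                PySem.Str.len (pvText cd) > PySem.Str.len (d.getD (pvCode cd) "") then
          d.insert (pvCode cd) (pvText cd)
        else d)
        desc_map)
    PySem.Dict.empty).items

-- ===== PORT B =====
-- max(texts, key=len): texts is never empty (defaultdict groups hold at least one element),
-- so the .getD "" only makes the call total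
def pvMaxLen (ts : List String) : String :=
  (PySem.List.max? ts (fun s => PySem.Str.len s)).getD ""

def build_icd_descriptions_alt (pf_map : List (String × List (String × List (List (String × String))))) : List (String × String) :=
  let groups : PySem.Dict String (List String) :=
    (PySem.Dict.ofList pf_map).values.foldl (fun g pf =>
      ((PySem.Dict.ofList pf).getD "icd_code_descriptions" []).foldl (fun g cd =>
        if pvCode cd = "" then g
        else g.modify (pvCode cd) [] (· ++ [pvText cd]))
        g)
      PySem.Dict.empty
  groups.items.map (fun p => (p.1, pvMaxLen p.2))

-- ===== PRECONDITION & SPEC =====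
def Spec_build_icd_descriptions (pf_map : List (String × List (String × List (List (String × String))))) (out : List (String × String)) : Prop := out = build_icd_descriptions_alt pf_map
instance (pf_map : List (String × List (String × List (List (String × String))))) (out : List (String × String)) : Decidable (Spec_build_icd_descriptions pf_map out) := by unfold Spec_build_icd_descriptions; infer_instance

-- ===== CLAIM (what is proved, stated in full; the proofs are below) =====
def Claim_equal_build_icd_descriptions : Prop := ∀ (pf_map : List (String × List (String × List (List (String × String))))), Dom_build_icd_descriptions pf_map → Spec_build_icd_descriptions pf_map (build_icd_descriptions pf_map)

-- ===== LEMMAS AND PROOFS =====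

-- A's cd-step and B's cd-step, as named step functions
def pvStepA (d : PySem.Dict String String) (cd : List (String × String)) : PySem.Dict String String :=
  if pvCode cd = "" then d
  else if d.contains (pvCode cd) = false ∨
          PySem.Str.len (pvText cd) > PySem.Str.len (d.getD (pvCode cd) "") then
    d.insert (pvCode cd) (pvText cd)
  else d

def pvStepB (g : PySem.Dict String (List String)) (cd : List (String × String)) : PySem.Dict String (List String) :=
  if pvCode cd = "" then g
  else g.modify (pvCode cd) [] (· ++ [pvText cd])

-- the first-longest of each group, applied to a whole groups dict
def pvRender (g : PySem.Dict String (List String)) : PySem.Dict String String :=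
  PySem.Dict.mk (g.items.map (fun p => (p.1, pvMaxLen p.2)))

theorem pvMaxLen_singleton (t : String) : pvMaxLen [t] = t := rfl

theorem pvMaxLen_append (ts : List String) (t : String) (h : ts ≠ []) :
    pvMaxLen (ts ++ [t]) =
      if PySem.Str.len (pvMaxLen ts) < PySem.Str.len t then t else pvMaxLen ts := by
  obtain ⟨m, hm⟩ := Option.ne_none_iff_exists'.1
    (mt (PySem.List.max?_eq_none_iff ts (fun s => PySem.Str.len s)).1 h)
  simp only [pvMaxLen, PySem.List.max?, List.foldl_append] at *
  rw [hm]
  simp only [List.foldl_cons, List.foldl_nil, Option.getD_some]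
  split_ifs <;> simp_all

theorem pvRender_contains (g : PySem.Dict String (List String)) (c : String) :
    (pvRender g).contains c = g.contains c := by
  cases g with
  | mk items =>
    simp [pvRender, PySem.Dict.contains_mk, List.any_map, Function.comp_def]

theorem pvUnique (g : PySem.Dict String (List String)) (hnd : g.keys.Nodup)
    {c : String} {ts : List String} (h1 : (c, ts) ∈ g.items)
    {p : String × List String} (h2 : p ∈ g.items) (h3 : p.1 = c) : p = (c, ts) := by
  obtain ⟨p1, p2⟩ := p
  simp only at h3; subst h3
  have e1 := PySem.Dict.getD_of_mem_items g h1 hnd []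
  have e2 := PySem.Dict.getD_of_mem_items g h2 hnd []
  simp [e1] at e2
  simp [e2]

theorem pvRender_getD (g : PySem.Dict String (List String)) (hnd : g.keys.Nodup)
    {c : String} {ts : List String} (h1 : (c, ts) ∈ g.items) :
    (pvRender g).getD c "" = pvMaxLen ts := by
  have hmem : (c, pvMaxLen ts) ∈ (pvRender g).items := by
    simp only [pvRender]
    exact List.mem_map.2 ⟨(c, ts), h1, rfl⟩
  have hndr : (pvRender g).keys.Nodup := by
    cases g with
    | mk items =>
      simpa [pvRender, PySem.Dict.keys_mk, List.map_map, Function.comp_def] using hnd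
  exact PySem.Dict.getD_of_mem_items _ hmem hndr ""

-- A's compare-and-replace on the rendered dict is B's group-append, rendered
theorem pvIns_commute (g : PySem.Dict String (List String)) (hnd : g.keys.Nodup)
    (hne : ∀ p ∈ g.items, p.2 ≠ []) (c t : String) :
    (if (pvRender g).contains c = false ∨
        PySem.Str.len t > PySem.Str.len ((pvRender g).getD c "") then
      (pvRender g).insert c t else pvRender g)
    = pvRender (g.insert c (g.getD c [] ++ [t])) := by
  by_cases hcon : g.contains c = true
  · obtain ⟨v, hv⟩ : ∃ v, g.get? c = some v := by
      rw [PySem.Dict.contains_eq_isSome_get?] at hcon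
      exact Option.isSome_iff_exists.1 hcon
    have hts : (c, v) ∈ g.items := PySem.Dict.mem_items_of_get?_eq_some g hv
    have hgd : g.getD c [] = v := by
      rw [PySem.Dict.getD_eq_get?_getD, hv]; rfl
    have hvne : v ≠ [] := hne _ hts
    have hrg : (pvRender g).getD c "" = pvMaxLen v := pvRender_getD g hnd hts
    have hcond : ((pvRender g).contains c = false ∨
        PySem.Str.len t > PySem.Str.len ((pvRender g).getD c "")) ↔
        PySem.Str.len (pvMaxLen v) < PySem.Str.len t := by
      rw [pvRender_contains, hcon, hrg]; simp [GT.gt]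
    have hrepl : (g.insert c (v ++ [t])).items =
        g.items.map (fun p => if p.1 == c then (c, v ++ [t]) else p) :=
      PySem.Dict.items_insert_of_contains g _ hcon
    rw [hgd]
    by_cases h : PySem.Str.len (pvMaxLen v) < PySem.Str.len t
    · rw [if_pos (hcond.2 h)]
      apply PySem.Dict.ext
      rw [PySem.Dict.items_insert_of_contains _ _ (by rwa [pvRender_contains])]
      simp only [pvRender, hrepl, List.map_map]
      apply List.map_congr_left
      intro p hp
      by_cases hpc : p.1 = c
      · have hpe : p = (c, v) := pvUnique g hnd hts hp hpc
        subst hpe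
        simp only [Function.comp_def, beq_self_eq_true, if_true]
        rw [pvMaxLen_append v t hvne, if_pos h]
      · simp [hpc]
    · rw [if_neg (fun hx => h (hcond.1 hx))]
      apply PySem.Dict.ext
      simp only [pvRender, hrepl, List.map_map]
      apply List.map_congr_left
      intro p hp
      by_cases hpc : p.1 = c
      · have hpe : p = (c, v) := pvUnique g hnd hts hp hpc
        subst hpe
        simp only [Function.comp_def, beq_self_eq_true, if_true]
        rw [pvMaxLen_append v t hvne, if_neg h]
      · simp [hpc]
  · have hcon' : g.contains c = false := by simpa using hcon
    have hgd : g.getD c [] = [] := PySem.Dict.getD_of_not_contains g [] hcon'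
    rw [if_pos (Or.inl (by rwa [pvRender_contains])), hgd]
    apply PySem.Dict.ext
    rw [PySem.Dict.items_insert_of_not_contains _ _ (by rwa [pvRender_contains]),
        pvRender, pvRender, PySem.Dict.items_insert_of_not_contains _ _ hcon']
    simp [pvMaxLen_singleton]

theorem pvStep_commute (g : PySem.Dict String (List String)) (hnd : g.keys.Nodup)
    (hne : ∀ p ∈ g.items, p.2 ≠ []) (cd : List (String × String)) :
    pvStepA (pvRender g) cd = pvRender (pvStepB g cd) := by
  by_cases hc : pvCode cd = ""
  · simp [pvStepA, pvStepB, hc]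
  · have hmod : g.modify (pvCode cd) [] (· ++ [pvText cd]) =
        g.insert (pvCode cd) (g.getD (pvCode cd) [] ++ [pvText cd]) := rfl
    rw [pvStepA, pvStepB, if_neg hc, if_neg hc, hmod]
    exact pvIns_commute g hnd hne (pvCode cd) (pvText cd)

theorem pvStepB_nodup (g : PySem.Dict String (List String)) (hnd : g.keys.Nodup)
    (cd : List (String × String)) : (pvStepB g cd).keys.Nodup := by
  by_cases hc : pvCode cd = ""
  · simpa [pvStepB, hc] using hnd
  · have : pvStepB g cd = g.insert (pvCode cd) (g.getD (pvCode cd) [] ++ [pvText cd]) := by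
      simp [pvStepB, hc]; rfl
    rw [this]
    exact PySem.Dict.nodup_keys_insert g _ _ hnd

theorem pvStepB_ne (g : PySem.Dict String (List String))
    (hne : ∀ p ∈ g.items, p.2 ≠ []) (cd : List (String × String)) :
    ∀ p ∈ (pvStepB g cd).items, p.2 ≠ [] := by
  by_cases hc : pvCode cd = ""
  · simpa [pvStepB, hc] using hne
  · have : pvStepB g cd = g.insert (pvCode cd) (g.getD (pvCode cd) [] ++ [pvText cd]) := by
      simp [pvStepB, hc]; rfl
    rw [this]
    intro p hp
    rcases (PySem.Dict.mem_items_insert _ _ _ _).1 hp with h | ⟨h, _⟩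
    · subst h; simp
    · exact hne p h

theorem pvMain (cds : List (List (String × String))) :
    ∀ (g : PySem.Dict String (List String)), g.keys.Nodup → (∀ p ∈ g.items, p.2 ≠ []) →
      cds.foldl pvStepA (pvRender g) = pvRender (cds.foldl pvStepB g) := by
  induction cds with
  | nil => intro g _ _; rfl
  | cons cd rest ih =>
    intro g hnd hne
    simp only [List.foldl_cons]
    rw [pvStep_commute g hnd hne cd]
    exact ih _ (pvStepB_nodup g hnd cd) (pvStepB_ne g hne cd)

-- ===== VERDICT (by name: the statement is the Claim_ definition above) =====
theorem build_icd_descriptions_spec : Claim_equal_build_icd_descriptions := by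
  intro pf_map _
  unfold Spec_build_icd_descriptions build_icd_descriptions build_icd_descriptions_alt
  rw [show (PySem.Dict.empty : PySem.Dict String String) = pvRender PySem.Dict.empty from rfl]
  have hA : ∀ (init : PySem.Dict String String),
      (PySem.Dict.ofList pf_map).values.foldl (fun desc_map pf =>
        ((PySem.Dict.ofList pf).getD "icd_code_descriptions" []).foldl (fun d cd =>
          if pvCode cd = "" then d
          else if d.contains (pvCode cd) = false ∨
                  PySem.Str.len (pvText cd) > PySem.Str.len (d.getD (pvCode cd) "") then
            d.insert (pvCode cd) (pvText cd)
          else d) desc_map) init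
      = ((PySem.Dict.ofList pf_map).values.flatMap
          (fun pf => (PySem.Dict.ofList pf).getD "icd_code_descriptions" [])).foldl pvStepA init := by
    intro init; rw [List.foldl_flatMap]; rfl
  have hB : ∀ (init : PySem.Dict String (List String)),
      (PySem.Dict.ofList pf_map).values.foldl (fun g pf =>
        ((PySem.Dict.ofList pf).getD "icd_code_descriptions" []).foldl (fun g cd =>
          if pvCode cd = "" then g
          else g.modify (pvCode cd) [] (· ++ [pvText cd])) g) init
      = ((PySem.Dict.ofList pf_map).values.flatMap
          (fun pf => (PySem.Dict.ofList pf).getD "icd_code_descriptions" [])).foldl pvStepB init := by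
    intro init; rw [List.foldl_flatMap]; rfl
  rw [hA, hB]
  rw [pvMain _ PySem.Dict.empty (by simp [PySem.Dict.keys_empty]) (by intro p hp; simp [PySem.Dict.empty] at hp)]
  rfl
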